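-- pv_equiv track=rewrite | github.com/Ireoluwa-A/Youkaryote | mapGeneration.py | getLargestRegion
-- ===== SOURCE A (Python) =====
-- def getLargestRegion(regions):
--     bestSize = None
--     bestRegion = None
--     for region in regions:
--         if bestSize == None or len(region) > bestSize:
--             bestRegion = region
--             bestSize = len(region)
--     return bestRegion
-- ===== SOURCE B (Python) =====
-- def getLargestRegion(regions):
--     if not regions:
--         return None
--     return sorted(regions, key=len, reverse=True)[0]
-- ===== Notes on version B (the rewrite author's own statement) =====
-- stated objective: idiomatic
-- what changed: Replaces the manual best-so-far scan with a stable descending sort by length and taking the first element; the stable sort preserves A's first-maximum tie-breaking.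
import Mathlib
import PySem

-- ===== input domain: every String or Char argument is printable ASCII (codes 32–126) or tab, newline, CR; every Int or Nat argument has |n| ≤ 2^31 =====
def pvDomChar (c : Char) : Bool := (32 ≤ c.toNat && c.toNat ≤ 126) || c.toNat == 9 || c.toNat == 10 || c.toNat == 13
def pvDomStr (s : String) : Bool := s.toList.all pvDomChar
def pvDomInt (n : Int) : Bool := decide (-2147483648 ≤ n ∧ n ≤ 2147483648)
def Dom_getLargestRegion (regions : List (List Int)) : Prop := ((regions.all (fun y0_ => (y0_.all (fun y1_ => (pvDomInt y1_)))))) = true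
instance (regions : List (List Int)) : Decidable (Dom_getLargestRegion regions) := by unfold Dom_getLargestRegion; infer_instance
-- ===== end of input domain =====

-- ===== PORT A =====
-- B replaces A's manual best-so-far scan by a stable descending sort by length (idiomatic; not faster).
def getLargestRegion (regions : List (List Int)) : Option (List Int) :=
  (regions.foldl
    (fun (st : Option Int × Option (List Int)) region =>
      match st.1 with
      | none => (some (region.length : Int), some region)
      | some s => if (region.length : Int) > s then (some (region.length : Int), some region) else st)
    (none, none)).2

-- ===== PORT B =====
def getLargestRegion_alt (regions : List (List Int)) : Option (List Int) :=
  if regions = [] then none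
  else PySem.List.pyGet? (PySem.List.sorted regions (fun r => (r.length : Int)) true) 0

-- ===== PRECONDITION & SPEC =====
def Spec_getLargestRegion (regions : List (List Int)) (out : Option (List Int)) : Prop := out = getLargestRegion_alt regions
instance (regions : List (List Int)) (out : Option (List Int)) : Decidable (Spec_getLargestRegion regions out) := by unfold Spec_getLargestRegion; infer_instance

-- ===== CLAIM (what is proved, stated in full; the proofs are below) =====
def Claim_equal_getLargestRegion : Prop := ∀ (regions : List (List Int)), Dom_getLargestRegion regions → Spec_getLargestRegion regions (getLargestRegion regions)

-- ===== LEMMAS AND PROOFS =====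

-- the common "first strict maximum by length" step both proofs reduce to
def pvStep (b x : List Int) : List Int := if (x.length : Int) > (b.length : Int) then x else b

-- A's fold, once the state is initialised, is the pvStep fold (invariant: size = length of best)
theorem foldA_eq (xs : List (List Int)) : ∀ (b : List Int),
    (xs.foldl
      (fun (st : Option Int × Option (List Int)) region =>
        match st.1 with
        | none => (some (region.length : Int), some region)
        | some s => if (region.length : Int) > s then (some (region.length : Int), some region) else st)
      (some (b.length : Int), some b)).2 = some (xs.foldl pvStep b) := by
  induction xs with
  | nil => intro b; simp
  | cons x xs ih =>
    intro b
    simp only [List.foldl_cons, pvStep]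
    split_ifs with h
    · exact ih x
    · exact ih b

-- the head of the insertion fold behind sorted(·, reverse=True) is the pvStep fold
theorem head_foldl_insertBy (xs : List (List Int)) : ∀ (h : List Int) (t : List (List Int)),
    ((xs.foldl
       (fun acc x => PySem.List.insertBy (fun a b => decide ((b.length : Int) < (a.length : Int))) x acc)
       (h :: t)).head?) = some (xs.foldl pvStep h) := by
  induction xs with
  | nil => intro h t; simp
  | cons x xs ih =>
    intro h t
    simp only [List.foldl_cons, PySem.List.insertBy]
    by_cases hc : (h.length : Int) < (x.length : Int)
    · simp only [hc, decide_true, if_true]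
      have := ih x (h :: t)
      simpa [pvStep, show ((x.length : Int) > (h.length : Int)) from hc] using this
    · simp only [hc, decide_false]
      have := ih h (PySem.List.insertBy (fun a b => decide ((b.length : Int) < (a.length : Int))) x t)
      have hx : ¬ ((x.length : Int) > (h.length : Int)) := hc
      simpa [pvStep, hx] using this

-- ===== VERDICT (by name: the statement is the Claim_ definition above) =====
theorem getLargestRegion_spec : Claim_equal_getLargestRegion := by
  intro regions _
  unfold Spec_getLargestRegion getLargestRegion getLargestRegion_alt
  cases regions with
  | nil => simp
  | cons h t =>
    rw [PySem.List.sorted_rev_eq_foldl_insertBy]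
    simp only [List.foldl_cons]
    rw [foldA_eq]
    rw [show (PySem.List.insertBy (fun a b => decide (((b : List Int).length : Int) < ((a : List Int).length : Int))) h ([] : List (List Int))) = [h] from rfl]
    rw [if_neg (by simp)]
    rw [show ∀ (l : List (List Int)), PySem.List.pyGet? l 0 = l.head? from fun l => by
      cases l <;> simp [PySem.List.pyGet?, PySem.List.pyIdx?]]
    rw [head_foldl_insertBy]
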